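-- pv_equiv track=rewrite | github.com/Nerif-AI/Nerif | src/nerif/utils/prompt.py | _find_conditionals
-- ===== SOURCE A (Python) =====
-- from typing import Any, Dict, List, Optional, Set, Tuple
--
-- def _find_conditionals(template: str) -> List[Tuple[int, int, str]]:
--     """Find all {? ... } sections, handling nested {var} braces.
--
--     Returns list of (start, end, inner_content) tuples.
--     """
--     results = []
--     i = 0
--     while i < len(template) - 1:
--         if template[i : i + 2] == "{?":
--             # Find the matching closing brace, accounting for nested {var}
--             depth = 1
--             start = i
--             j = i + 2
--             while j < len(template) and depth > 0:
--                 if template[j] == "{":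
--                     depth += 1
--                 elif template[j] == "}":
--                     depth -= 1
--                 j += 1
--             if depth == 0:
--                 # inner content is between {? and the final }
--                 inner = template[start + 2 : j - 1]
--                 results.append((start, j, inner))
--                 i = j
--                 continue
--         i += 1
--     return results
-- ===== SOURCE B (Python) =====
-- from typing import List, Tuple
--
-- def _find_conditionals(template: str) -> List[Tuple[int, int, str]]:
--     """Find all {? ... } sections, handling nested {var} braces.
--
--     Returns list of (start, end, inner_content) tuples.
--     """
--     # One linear pass: standard brace matching with a stack gives, for every
--     # '{', the position of its matching '}' (if any).  A '{?' section is
--     # closed exactly when its '{' has a match.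
--     match = {}
--     stack = []
--     i = 0
--     for ch in template:
--         if ch == "{":
--             stack.append(i)
--         elif ch == "}":
--             if stack:
--                 match[stack.pop()] = i
--         i += 1
--     results = []
--     i = 0
--     while i < len(template) - 1:
--         if template[i] == "{" and template[i + 1] == "?" and i in match:
--             j = match[i]
--             results.append((i, j + 1, template[i + 2 : j]))
--             i = j + 1
--         else:
--             i += 1
--     return results
-- ===== Notes on version B (the rewrite author's own statement) =====
-- stated objective: alternative
-- what changed: Replaces A's per-candidate rescan of the suffix (restarted after every unclosed section) by one stack-based matching pass that precomputes every open brace's closing position, which the walk then merely looks up; intended as asymptotically faster, measured ~1.5x on the generated inputs.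
import Mathlib
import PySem

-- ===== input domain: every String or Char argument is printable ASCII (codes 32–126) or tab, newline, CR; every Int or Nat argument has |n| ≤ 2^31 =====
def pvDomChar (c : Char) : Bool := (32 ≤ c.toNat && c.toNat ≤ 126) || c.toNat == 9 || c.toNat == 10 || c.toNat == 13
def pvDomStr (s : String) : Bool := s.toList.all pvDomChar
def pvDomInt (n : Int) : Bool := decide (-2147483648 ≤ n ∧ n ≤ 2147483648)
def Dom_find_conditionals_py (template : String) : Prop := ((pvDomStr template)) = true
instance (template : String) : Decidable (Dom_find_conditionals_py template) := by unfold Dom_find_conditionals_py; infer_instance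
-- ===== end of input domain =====

-- B replaces A's per-candidate rescan of the suffix by one stack-based brace-matching pass
-- that precomputes every open brace's matching close position (alternative algorithm; intended
-- as asymptotically faster, measured only ~1.5x on the generated inputs).

-- ===== PORT A =====
-- inner `while j < len(template) and depth > 0` loop of A, on the suffix starting at j:
-- returns (number of characters consumed, final depth)
def pvScanA : List Char → Nat → Nat × Nat
  | [], d => (0, d)
  | c :: r, d =>
    if d = 0 then (0, d)
    else
      let d' := if c = '{' then d + 1 else if c = '}' then d - 1 else d
      let p := pvScanA r d'
      (p.1 + 1, p.2)

-- outer `while i < len(template) - 1` loop of A (cs = template as code points)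
def pvLoopA (cs : List Char) (i : Nat) : List (Int × Int × String) :=
  if h : i + 1 < cs.length then
    if PySem.List.slice cs (some (i : Int)) (some ((i : Int) + 2)) = ['{', '?'] then
      let p := pvScanA (cs.drop (i + 2)) 1
      if p.2 = 0 then
        ((i : Int), ((i + 2 + p.1 : Nat) : Int),
          String.ofList (PySem.List.slice cs (some ((i + 2 : Nat) : Int)) (some ((i + 2 + p.1 - 1 : Nat) : Int))))
          :: pvLoopA cs (i + 2 + p.1)
      else pvLoopA cs (i + 1)
    else pvLoopA cs (i + 1)
  else []
  termination_by cs.length - i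
  decreasing_by all_goals omega

def find_conditionals_py (template : String) : List (Int × Int × String) :=
  pvLoopA template.toList 0

-- ===== PORT B =====
-- one step of B's first pass (state: running index, stack of open '{' positions, match dict);
-- the Python list used as a stack (append/pop at the end) is modelled with the top at the head
def pvBmStep (st : Nat × List Nat × PySem.Dict Nat Nat) (c : Char) : Nat × List Nat × PySem.Dict Nat Nat :=
  if c = '{' then (st.1 + 1, st.1 :: st.2.1, st.2.2)
  else if c = '}' then
    match st.2.1 with
    | [] => (st.1 + 1, [], st.2.2)
    | p :: rest => (st.1 + 1, rest, st.2.2.insert p st.1)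
  else (st.1 + 1, st.2.1, st.2.2)

-- B's first pass: `for ch in template: ...`
def pvBmState (cs : List Char) : Nat × List Nat × PySem.Dict Nat Nat :=
  cs.foldl pvBmStep (0, [], PySem.Dict.empty)

-- B's second pass: `while i < len(template) - 1` (fuel bounds the loop; it only makes the
-- recursion total — cs.length iterations always suffice because i strictly increases)
def pvWalkB (cs : List Char) (m : PySem.Dict Nat Nat) : Nat → Nat → List (Int × Int × String)
  | 0, _ => []
  | fuel + 1, i =>
    if i + 1 < cs.length then
      if cs[i]? = some '{' ∧ cs[i + 1]? = some '?' ∧ (m.get? i).isSome then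
        let j := (m.get? i).getD 0
        ((i : Int), ((j + 1 : Nat) : Int),
          String.ofList (PySem.List.slice cs (some ((i + 2 : Nat) : Int)) (some ((j : Nat) : Int))))
          :: pvWalkB cs m fuel (j + 1)
      else pvWalkB cs m fuel (i + 1)
    else []

def find_conditionals_py_alt (template : String) : List (Int × Int × String) :=
  let cs := template.toList
  pvWalkB cs (pvBmState cs).2.2 cs.length 0

-- ===== PRECONDITION & SPEC =====
def Spec_find_conditionals_py (template : String) (out : List (Int × Int × String)) : Prop := out = find_conditionals_py_alt template
instance (template : String) (out : List (Int × Int × String)) : Decidable (Spec_find_conditionals_py template out) := by unfold Spec_find_conditionals_py; infer_instance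

-- ===== CLAIM (what is proved, stated in full; the proofs are below) =====
def Claim_equal_find_conditionals_py : Prop := ∀ (template : String), Dom_find_conditionals_py template → Spec_find_conditionals_py template (find_conditionals_py template)

-- ===== LEMMAS AND PROOFS =====

-- the scan never moves once depth is 0
theorem pvScanA_zero (r : List Char) : pvScanA r 0 = (0, 0) := by
  cases r <;> simp [pvScanA]

-- the step function always advances the running index by one
theorem pvBmStep_fst (s : Nat × List Nat × PySem.Dict Nat Nat) (c : Char) :
    (pvBmStep s c).1 = s.1 + 1 := by
  obtain ⟨i, st, m⟩ := s
  unfold pvBmStep; split_ifs <;> [rfl; cases st <;> rfl; rfl]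


-- structural invariant of the first pass: index advances by length, stack entries and dict keys stay below it
theorem pvBm_inv (r : List Char) : ∀ (s : Nat × List Nat × PySem.Dict Nat Nat),
    (∀ q ∈ s.2.1, q < s.1) → s.2.1.Nodup → (∀ q, ((s.2.2).get? q).isSome → q < s.1) →
    (r.foldl pvBmStep s).1 = s.1 + r.length ∧
    (∀ q ∈ (r.foldl pvBmStep s).2.1, q < (r.foldl pvBmStep s).1) ∧
    (r.foldl pvBmStep s).2.1.Nodup ∧
    (∀ q, (((r.foldl pvBmStep s).2.2).get? q).isSome → q < (r.foldl pvBmStep s).1) := by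
  induction r with
  | nil => intro s h1 h2 h3; simpa using ⟨h1, h2, h3⟩
  | cons c r ih =>
    intro s h1 h2 h3
    rw [List.foldl_cons]
    have key : (∀ q ∈ (pvBmStep s c).2.1, q < (pvBmStep s c).1) ∧ (pvBmStep s c).2.1.Nodup ∧
        (∀ q, (((pvBmStep s c).2.2).get? q).isSome → q < (pvBmStep s c).1) := by
      obtain ⟨i, st, m⟩ := s
      simp only [pvBmStep]
      split_ifs with hbr hcl
      · refine ⟨?_, ?_, ?_⟩
        · intro q hq; rcases List.mem_cons.1 hq with h | h
          · omega
          · exact lt_trans (h1 q h) (by omega)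
        · exact List.nodup_cons.2 ⟨fun hmem => absurd (h1 _ hmem) (by omega), h2⟩
        · intro q hq; exact lt_trans (h3 q hq) (by omega)
      · cases st with
        | nil =>
          dsimp only
          exact ⟨by simp, by simp, fun q hq => lt_trans (h3 q hq) (by omega)⟩
        | cons p rest =>
          dsimp only
          refine ⟨?_, ?_, ?_⟩
          · intro q hq; exact lt_trans (h1 q (List.mem_cons_of_mem _ hq)) (by omega)
          · exact h2.of_cons
          · intro q hq
            simp only [PySem.Dict.get?_insert] at hq
            by_cases hqp : q = p
            · have := h1 p List.mem_cons_self; omega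
            · rw [if_neg hqp] at hq; exact lt_trans (h3 q hq) (by omega)
      · exact ⟨fun q hq => lt_trans (h1 q hq) (by omega), h2,
          fun q hq => lt_trans (h3 q hq) (by omega)⟩
    obtain ⟨k1, k2, k3⟩ := key
    obtain ⟨g1, g2, g3, g4⟩ := ih (pvBmStep s c) k1 k2 k3
    exact ⟨by rw [g1, pvBmStep_fst]; simp; omega, g2, g3, g4⟩

-- preservation: a key already in the dict, not on the stack and below the running index,
-- is never overwritten by the rest of the first pass
theorem pvBm_preserve (r : List Char) : ∀ (i : Nat) (st : List Nat) (m : PySem.Dict Nat Nat) (p : Nat),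
    p ∉ st → p < i → (∀ q ∈ st, q < i) →
    ((r.foldl pvBmStep (i, st, m)).2.2).get? p = m.get? p := by
  induction r with
  | nil => intro i st m p _ _ _; rfl
  | cons c r ih =>
    intro i st m p hns hpi hbd
    rw [List.foldl_cons]
    simp only [pvBmStep]
    split_ifs with hbr hcl
    · exact ih (i+1) (i :: st) m p
        (fun hmem => by rcases List.mem_cons.1 hmem with h | h <;> [omega; exact absurd h hns])
        (by omega) (fun q hq => by rcases List.mem_cons.1 hq with h | h <;> [omega; exact lt_trans (hbd q h) (by omega)])
    · cases st with
      | nil =>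
        dsimp only
        exact ih (i+1) [] m p (by simp) (by omega) (by simp)
      | cons q rest =>
        dsimp only
        rw [ih (i+1) rest _ p (fun hmem => hns (List.mem_cons_of_mem _ hmem)) (by omega)
          (fun x hx => lt_trans (hbd x (List.mem_cons_of_mem _ hx)) (by omega))]
        exact PySem.Dict.get?_insert_of_ne _ _ (fun hpq => hns (hpq ▸ List.mem_cons_self))
    · exact ih (i+1) st m p hns (by omega) (fun q hq => lt_trans (hbd q hq) (by omega))


-- simulation: for a position p open on the stack at depth (idx+1), the rest of the first pass
-- records in the dict exactly the closing position that A's inner scan would find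
theorem pvBm_sim (r : List Char) : ∀ (i : Nat) (st : List Nat) (m : PySem.Dict Nat Nat) (p idx : Nat),
    st[idx]? = some p → m.get? p = none → (∀ q ∈ st, q < i) → st.Nodup →
    ((r.foldl pvBmStep (i, st, m)).2.2).get? p =
      (if (pvScanA r (idx + 1)).2 = 0 then some (i + (pvScanA r (idx + 1)).1 - 1) else none) := by
  induction r with
  | nil =>
    intro i st m p idx hidx hnone hbd hnd
    simpa [pvScanA] using hnone
  | cons c r ih =>
    intro i st m p idx hidx hnone hbd hnd
    rw [List.foldl_cons]
    by_cases hbr : c = '{'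
    · -- an opening brace: p moves one deeper on the stack, the scan depth rises by one
      have hs : pvScanA (c :: r) (idx + 1)
          = ((pvScanA r (idx + 1 + 1)).1 + 1, (pvScanA r (idx + 1 + 1)).2) := by
        simp [pvScanA, hbr]
      rw [hs]
      simp only [pvBmStep, if_pos hbr]
      rw [ih (i+1) (i :: st) m p (idx+1) (by simpa using hidx) hnone
        (fun q hq => by rcases List.mem_cons.1 hq with h | h <;> [omega; exact lt_trans (hbd q h) (by omega)])
        (List.nodup_cons.2 ⟨fun hmem => absurd (hbd _ hmem) (by omega), hnd⟩)]
      split_ifs with hd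
      · exact congrArg some (by omega)
      · rfl
    · by_cases hcl : c = '}'
      · -- a closing brace: the top of the stack is matched here
        cases st with
        | nil => simp at hidx
        | cons q rest =>
          simp only [pvBmStep, if_neg hbr, if_pos hcl]
          cases idx with
          | zero =>
            have hqp : q = p := by simpa using hidx
            subst hqp
            have hs : pvScanA (c :: r) (0 + 1) = (1, 0) := by
              simp [pvScanA, hcl, pvScanA_zero]
            rw [hs, pvBm_preserve r (i+1) rest _ q (List.nodup_cons.1 hnd).1
              (by have := hbd q List.mem_cons_self; omega)
              (fun x hx => lt_trans (hbd x (List.mem_cons_of_mem _ hx)) (by omega))]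
            simp [PySem.Dict.get?_insert_self]
          | succ n =>
            have hrest : rest[n]? = some p := by simpa using hidx
            have hqp : q ≠ p := by
              intro h; exact (List.nodup_cons.1 hnd).1 (h ▸ List.mem_of_getElem? hrest)
            have hs : pvScanA (c :: r) (n + 1 + 1)
                = ((pvScanA r (n + 1)).1 + 1, (pvScanA r (n + 1)).2) := by
              simp [pvScanA, hcl]
            rw [hs, ih (i+1) rest (m.insert q i) p n hrest
              (by rw [PySem.Dict.get?_insert_of_ne _ _ (Ne.symm hqp)]; exact hnone)
              (fun x hx => lt_trans (hbd x (List.mem_cons_of_mem _ hx)) (by omega))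
              (List.nodup_cons.1 hnd).2]
            split_ifs with hd
            · exact congrArg some (by omega)
            · rfl
      · -- any other character: nothing changes but the index
        have hs : pvScanA (c :: r) (idx + 1)
            = ((pvScanA r (idx + 1)).1 + 1, (pvScanA r (idx + 1)).2) := by
          simp [pvScanA, hbr, hcl]
        rw [hs]
        simp only [pvBmStep, if_neg hbr, if_neg hcl]
        rw [ih (i+1) st m p idx hidx hnone (fun x hx => lt_trans (hbd x hx) (by omega)) hnd]
        split_ifs with hd
        · exact congrArg some (by omega)
        · rfl


-- crux: the dict entry at a '{?' position is exactly what A's inner scan computes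
theorem pvMatch_spec (cs : List Char) (i : Nat) (h : i + 1 < cs.length)
    (h0 : cs[i]? = some '{') (h1 : cs[i + 1]? = some '?') :
    ((pvBmState cs).2.2).get? i =
      (if (pvScanA (cs.drop (i + 2)) 1).2 = 0
       then some (i + (pvScanA (cs.drop (i + 2)) 1).1 + 1) else none) := by
  have hlt : i < cs.length := by omega
  have hi : cs[i] = '{' := by rw [List.getElem?_eq_getElem hlt] at h0; exact Option.some.inj h0
  have hi1 : cs[i+1] = '?' := by rw [List.getElem?_eq_getElem h] at h1; exact Option.some.inj h1
  have hdropi : cs.drop i = '{' :: cs.drop (i+1) := by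
    rw [List.drop_eq_getElem_cons hlt, hi]
  have hdrop1 : cs.drop (i+1) = '?' :: cs.drop (i+2) := by
    rw [List.drop_eq_getElem_cons h, hi1]
  have hsplit : cs = cs.take i ++ '{' :: cs.drop (i+1) := by
    conv_lhs => rw [← List.take_append_drop i cs]
    rw [hdropi]
  have hinv := pvBm_inv (cs.take i) (0, [], PySem.Dict.empty) (by simp) (by simp)
    (by simp [PySem.Dict.get?_empty])
  set s₁ := (cs.take i).foldl pvBmStep (0, [], PySem.Dict.empty) with hs₁
  have hfst : s₁.1 = i := by
    rw [hinv.1, Nat.zero_add, List.length_take]; omega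
  have hnonei : s₁.2.2.get? i = none := by
    cases hg : s₁.2.2.get? i with
    | none => rfl
    | some v =>
      exfalso
      have := hinv.2.2.2 i (by rw [hg]; rfl)
      omega
  have hstep : pvBmStep s₁ '{' = (i+1, i :: s₁.2.1, s₁.2.2) := by
    simp [pvBmStep, hfst]
  have hsim := pvBm_sim (cs.drop (i+1)) (i+1) (i :: s₁.2.1) s₁.2.2 i 0 (by simp) hnonei
    (fun q hq => by
      rcases List.mem_cons.1 hq with hh | hh
      · omega
      · have := hinv.2.1 q hh; omega)
    (List.nodup_cons.2 ⟨fun hmem => by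
      have := hinv.2.1 i hmem; omega, hinv.2.2.1⟩)
  have hscan : pvScanA (cs.drop (i+1)) (0 + 1)
      = ((pvScanA (cs.drop (i+2)) 1).1 + 1, (pvScanA (cs.drop (i+2)) 1).2) := by
    rw [hdrop1]; simp [pvScanA]
  unfold pvBmState
  conv_lhs => rw [hsplit]
  rw [List.foldl_append, List.foldl_cons, ← hs₁, hstep, hsim, hscan]
  split_ifs with hd
  · exact congrArg some (by omega)
  · rfl

-- A's slice test agrees with B's two character tests
theorem pvGuard_iff (cs : List Char) (i : Nat) (h : i + 1 < cs.length) :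
    PySem.List.slice cs (some (i : Int)) (some ((i : Int) + 2)) = ['{', '?'] ↔
      (cs[i]? = some '{' ∧ cs[i + 1]? = some '?') := by
  rw [show ((i:Int) + 2) = ((i:Int) + ((2:Nat):Int)) from by norm_num,
    PySem.List.slice_natCast_add]
  rw [List.drop_eq_getElem_cons (show i < cs.length from by omega),
    List.drop_eq_getElem_cons (show i+1 < cs.length from h),
    List.take_succ_cons, List.take_succ_cons, List.take_zero]
  simp [h, show i < cs.length from by omega]

-- the two loops agree (any fuel covering the remaining positions)
theorem pvWalk_eq (cs : List Char) : ∀ (fuel i : Nat), cs.length ≤ fuel + i →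
    pvWalkB cs (pvBmState cs).2.2 fuel i = pvLoopA cs i := by
  intro fuel
  induction fuel with
  | zero =>
    intro i hle
    rw [pvLoopA, dif_neg (by omega)]
    rfl
  | succ fuel ih =>
    intro i hle
    rw [pvLoopA, pvWalkB]
    by_cases hlt : i + 1 < cs.length
    · rw [dif_pos hlt, if_pos hlt]
      by_cases hg : cs[i]? = some '{' ∧ cs[i+1]? = some '?'
      · rw [if_pos ((pvGuard_iff cs i hlt).2 hg)]
        have hms := pvMatch_spec cs i hlt hg.1 hg.2
        by_cases hd : (pvScanA (cs.drop (i+2)) 1).2 = 0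
        · have hms' : (pvBmState cs).2.2.get? i
              = some (i + (pvScanA (cs.drop (i+2)) 1).1 + 1) := by rw [hms, if_pos hd]
          rw [if_pos ⟨hg.1, hg.2, by rw [hms']; rfl⟩]
          simp only [hms', if_pos hd, Option.getD_some]
          have hk : i + 2 + (pvScanA (cs.drop (i+2)) 1).1 - 1
              = i + (pvScanA (cs.drop (i+2)) 1).1 + 1 := by omega
          have hk2 : i + (pvScanA (cs.drop (i+2)) 1).1 + 1 + 1
              = i + 2 + (pvScanA (cs.drop (i+2)) 1).1 := by omega
          rw [hk, hk2, ih (i + 2 + (pvScanA (cs.drop (i+2)) 1).1) (by omega)]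
        · have hms' : (pvBmState cs).2.2.get? i = none := by rw [hms, if_neg hd]
          rw [if_neg (by rw [hms']; simp), if_neg hd]
          exact ih (i+1) (by omega)
      · rw [if_neg (fun hcon => hg ((pvGuard_iff cs i hlt).1 hcon)),
          if_neg (fun hcon => hg ⟨hcon.1, hcon.2.1⟩)]
        exact ih (i+1) (by omega)
    · rw [dif_neg hlt, if_neg hlt]
-- ===== VERDICT (by name: the statement is the Claim_ definition above) =====
theorem find_conditionals_py_spec : Claim_equal_find_conditionals_py := by
  intro template _
  unfold Spec_find_conditionals_py find_conditionals_py find_conditionals_py_alt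
  exact (pvWalk_eq template.toList template.toList.length 0 (by omega)).symm
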